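-- pv_equiv track=rewrite | github.com/marcomatzi/PEASEC-WarnBot | telegram_api.py | generate_keyboard
-- ===== SOURCE A (Python) =====
-- def generate_keyboard(array):
--     """
--     Erhält ein Array mit Werten, welche zu einem Keyboard verknüpft werden. 2-Elemente pro Reihe!
--
--     :param array:
--     :return:
--     """
--     keyboard = []
--     if len(array) > 0:
--         num_kategorien = len(array)
--         if num_kategorien % 2 == 0:
--             # even number of elements
--             for i in range(0, num_kategorien, 2):
--                 keyboard.append([array[i][0], array[i + 1][0]])
--         else:
--             # odd number of elements
--             for i in range(0, num_kategorien - 1, 2):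
--                 keyboard.append([array[i][0], array[i + 1][0]])
--             keyboard.append([array[-1][0]])
--         keyboard.append(['>> Startseite'])
--
--     return keyboard
-- ===== SOURCE B (Python) =====
-- def generate_keyboard(array):
--     """B: single streaming pass; a 'pending' slot buffers one first-element until a
--     partner arrives, flushing completed rows; leftover pending becomes its own row."""
--     keyboard = []
--     pending = None
--     for row in array:
--         if pending is None:
--             pending = row[0]
--         else:
--             keyboard.append([pending, row[0]])
--             pending = None
--     if pending is not None:
--         keyboard.append([pending])
--     if array:
--         keyboard.append(['>> Startseite'])
--     return keyboard
-- ===== Notes on version B (the rewrite author's own statement) =====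
-- stated objective: alternative
-- what changed: B is a one-element-at-a-time streaming pass with a 'pending' buffer state that flushes a row whenever a partner arrives, replacing A's even/odd case split with stride-2 index loops and index arithmetic.
import Mathlib
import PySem

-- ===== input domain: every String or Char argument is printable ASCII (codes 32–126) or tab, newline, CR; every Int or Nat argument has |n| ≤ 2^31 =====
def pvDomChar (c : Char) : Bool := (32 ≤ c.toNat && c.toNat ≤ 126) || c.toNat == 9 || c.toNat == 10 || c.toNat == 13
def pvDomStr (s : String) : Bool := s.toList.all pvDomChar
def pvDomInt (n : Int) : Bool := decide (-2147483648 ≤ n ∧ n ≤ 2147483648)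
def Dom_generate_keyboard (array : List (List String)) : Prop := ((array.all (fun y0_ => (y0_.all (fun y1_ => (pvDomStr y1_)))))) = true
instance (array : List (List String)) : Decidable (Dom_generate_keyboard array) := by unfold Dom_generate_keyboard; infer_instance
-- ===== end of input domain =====

-- B replaces A's even/odd case split with stride-2 index loops by a single streaming fold
-- over the elements with a 'pending' buffer state (alternative decomposition; same cost).


-- ===== PORT A =====
def generate_keyboard (array : List (List String)) : List (List String) :=
  let keyboard : List (List String) := []
  if array.length > 0 then
    let num_kategorien : Int := (array.length : Int)
    if PySem.Int.mod num_kategorien 2 = 0 then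
      -- even number of elements
      ((PySem.List.pyRange 0 num_kategorien 2).foldl
        (fun kb i => kb ++ [[PySem.List.pyGetD (PySem.List.pyGetD array i []) 0 "",
                             PySem.List.pyGetD (PySem.List.pyGetD array (i + 1) []) 0 ""]]) keyboard)
        ++ [[">> Startseite"]]
    else
      -- odd number of elements
      (((PySem.List.pyRange 0 (num_kategorien - 1) 2).foldl
        (fun kb i => kb ++ [[PySem.List.pyGetD (PySem.List.pyGetD array i []) 0 "",
                             PySem.List.pyGetD (PySem.List.pyGetD array (i + 1) []) 0 ""]]) keyboard)
        ++ [[PySem.List.pyGetD (PySem.List.pyGetD array (-1) []) 0 ""]])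
        ++ [[">> Startseite"]]
  else keyboard

-- ===== PORT B =====
-- single pass: 'pending' buffers one first-element until a partner row arrives
def generate_keyboard_alt (array : List (List String)) : List (List String) :=
  let st := array.foldl
    (fun (st : List (List String) × Option String) row =>
      match st.2 with
      | none => (st.1, some (PySem.List.pyGetD row 0 ""))
      | some p => (st.1 ++ [[p, PySem.List.pyGetD row 0 ""]], none))
    ([], none)
  let keyboard := match st.2 with
    | some p => st.1 ++ [[p]]
    | none => st.1
  if array ≠ [] then keyboard ++ [[">> Startseite"]] else keyboard

-- ===== PRECONDITION & SPEC =====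
-- Pre_ excludes arrays containing an empty inner list: there Python A (and Python B) raise IndexError on element[0].
def Pre_generate_keyboard (array : List (List String)) : Prop := ∀ y ∈ array, y ≠ []
instance (array : List (List String)) : Decidable (Pre_generate_keyboard array) := by
  unfold Pre_generate_keyboard; infer_instance
def pvWitness_generate_keyboard : List (List String) := [["a"], ["b", "x"], ["c"]]

def Spec_generate_keyboard (array : List (List String)) (out : List (List String)) : Prop := out = generate_keyboard_alt array
instance (array : List (List String)) (out : List (List String)) : Decidable (Spec_generate_keyboard array out) := by unfold Spec_generate_keyboard; infer_instance

-- ===== CLAIM (what is proved, stated in full; the proofs are below) =====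
def Claim_equal_generate_keyboard : Prop := ∀ (array : List (List String)), Dom_generate_keyboard array → Pre_generate_keyboard array → Spec_generate_keyboard array (generate_keyboard array)

-- ===== LEMMAS AND PROOFS =====

-- closed form of B's fold: the completed rows and the leftover pending slot
def pairState : List (List String) → List (List String) × Option String
  | [] => ([], none)
  | [a] => ([], some (PySem.List.pyGetD a 0 ""))
  | a :: b :: rest =>
      let s := pairState rest
      ([PySem.List.pyGetD a 0 "", PySem.List.pyGetD b 0 ""] :: s.1, s.2)

lemma foldB_eq : ∀ (xs : List (List String)) (acc : List (List String)),
    xs.foldl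
      (fun (st : List (List String) × Option String) row =>
        match st.2 with
        | none => (st.1, some (PySem.List.pyGetD row 0 ""))
        | some p => (st.1 ++ [[p, PySem.List.pyGetD row 0 ""]], none))
      (acc, none)
    = (acc ++ (pairState xs).1, (pairState xs).2) := by
  intro xs
  induction xs using pairState.induct with
  | case1 => intro acc; simp [pairState]
  | case2 a => intro acc; simp [pairState, List.foldl]
  | case3 a b rest ih =>
      intro acc
      simp only [List.foldl, pairState]
      rw [ih (acc ++ [[PySem.List.pyGetD a 0 "", PySem.List.pyGetD b 0 ""]])]
      simp

-- the Nat-indexed rows of A's loop are exactly B's completed rows, when xs has m pairs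
lemma rows_eq_pairState (m : Nat) : ∀ (xs : List (List String)),
    2 * m ≤ xs.length → xs.length ≤ 2 * m + 1 →
    (List.range m).map (fun k =>
        ([(xs.getD (2 * k) []).getD 0 "", (xs.getD (2 * k + 1) []).getD 0 ""] : List String))
      = (pairState xs).1 := by
  induction m with
  | zero =>
    intro xs _ hle
    match xs, hle with
    | [], _ => rfl
    | [a], _ => rfl
  | succ m ih =>
    intro xs hge hle
    match xs, hge, hle with
    | a :: b :: rest, hge, hle =>
      have h1 : ∀ k : Nat, (a :: b :: rest).getD (2 * (k + 1)) ([] : List String) = rest.getD (2 * k) [] := by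
        intro k
        have h : 2 * (k + 1) = (2 * k) + 1 + 1 := by ring
        rw [h, List.getD_cons_succ, List.getD_cons_succ]
      have h2 : ∀ k : Nat, (a :: b :: rest).getD (2 * (k + 1) + 1) ([] : List String) = rest.getD (2 * k + 1) [] := by
        intro k
        have h : 2 * (k + 1) + 1 = (2 * k + 1) + 1 + 1 := by ring
        rw [h, List.getD_cons_succ, List.getD_cons_succ]
      have hrec := ih rest (by simp at hge; omega) (by simp at hle; omega)
      simp only [List.range_succ_eq_map, List.map_cons, List.map_map, pairState]
      rw [← hrec]
      refine List.cons_eq_cons.mpr ⟨by simp [PySem.List.pyGetD_zero], ?_⟩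
      apply List.map_congr_left
      intro k _
      simp only [Function.comp_apply, Nat.succ_eq_add_one]
      rw [h1 k, h2 k]

-- the pending slot: empty for even length, the last element's head for odd length
lemma pend_even (m : Nat) : ∀ (xs : List (List String)), xs.length = 2 * m →
    (pairState xs).2 = none := by
  induction m with
  | zero => intro xs h; match xs, h with | [], _ => rfl
  | succ m ih =>
    intro xs h
    match xs, h with
    | a :: b :: rest, h =>
      simp only [pairState]
      exact ih rest (by simp at h; omega)

lemma pend_odd (m : Nat) : ∀ (xs : List (List String)), xs.length = 2 * m + 1 →
    (pairState xs).2 = some (PySem.List.pyGetD (xs.getLast?.getD []) 0 "") := by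
  induction m with
  | zero => intro xs h; match xs, h with | [a], _ => rfl
  | succ m ih =>
    intro xs h
    match xs, h with
    | a :: b :: c :: rest, h =>
      simp only [pairState]
      rw [ih (c :: rest) (by simp at h ⊢; omega)]
      simp

-- A's range-step-2 fold over the first 2*m elements, in Nat-indexed map form
lemma foldA_eq (xs : List (List String)) (m : Nat) :
    (PySem.List.pyRange 0 ((2 * m : Nat) : Int) 2).foldl
      (fun kb i => kb ++ [[PySem.List.pyGetD (PySem.List.pyGetD xs i []) 0 "",
                           PySem.List.pyGetD (PySem.List.pyGetD xs (i + 1) []) 0 ""]]) []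
    = (List.range m).map (fun k =>
        ([(xs.getD (2 * k) []).getD 0 "", (xs.getD (2 * k + 1) []).getD 0 ""] : List String)) := by
  rw [PySem.List.pyRange_of_pos 0 ((2 * m : Nat) : Int) (by norm_num)]
  have hcnt : (if (0 : Int) < ((2 * m : Nat) : Int) then ((((2 * m : Nat) : Int) - 0 + 2 - 1) / 2).toNat else 0) = m := by
    split_ifs with h <;> omega
  rw [hcnt, List.foldl_map, PySem.List.foldl_append_singleton_eq_map, List.nil_append]
  apply List.map_congr_left
  intro k _
  have e1 : (0 : Int) + 2 * (k : Int) = ((2 * k : Nat) : Int) := by push_cast; ring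
  have e3 : ((2 * k : Nat) : Int) + 1 = ((2 * k + 1 : Nat) : Int) := by push_cast; ring
  rw [e1, e3]
  rw [PySem.List.pyGetD_natCast, PySem.List.pyGetD_natCast, PySem.List.pyGetD_zero, PySem.List.pyGetD_zero]

-- ===== VERDICT (by name: the statement is the Claim_ definition above) =====
theorem generate_keyboard_spec : Claim_equal_generate_keyboard := by
  intro array _ _
  unfold Spec_generate_keyboard
  simp only [generate_keyboard, generate_keyboard_alt]
  by_cases hnil : array = []
  · subst hnil; rfl
  · have hpos : array.length > 0 := List.length_pos_iff.mpr hnil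
    have hmod : PySem.Int.mod ((array.length : Nat) : Int) 2 = (((array.length % 2 : Nat)) : Int) := by
      exact_mod_cast PySem.Int.mod_natCast array.length 2
    rw [foldB_eq array []]
    rcases Nat.even_or_odd array.length with he | ho
    · obtain ⟨m, hm⟩ := he
      have hm' : array.length = 2 * m := by omega
      have hA : PySem.Int.mod ((array.length : Nat) : Int) 2 = 0 := by
        rw [hmod, hm']; simp [Nat.mul_mod_right]
      rw [if_pos hpos, if_pos hA, hm']
      rw [foldA_eq array m, rows_eq_pairState m array (by omega) (by omega)]
      rw [pend_even m array hm']
      simp [hnil]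
    · obtain ⟨m, hm⟩ := ho
      have hA : ¬ (PySem.Int.mod ((array.length : Nat) : Int) 2 = 0) := by
        rw [hmod, hm]
        intro h
        rw [Nat.cast_eq_zero] at h
        omega
      rw [if_pos hpos, if_neg hA, hm]
      rw [show ((2 * m + 1 : Nat) : Int) - 1 = ((2 * m : Nat) : Int) by push_cast; ring]
      rw [foldA_eq array m, rows_eq_pairState m array (by omega) (by omega)]
      rw [pend_odd m array hm]
      rw [PySem.List.pyGetD_neg_one array [] hnil]
      rw [List.getLast?_eq_some_getLast hnil]
      simp [hnil]
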